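-- pv_equiv track=rewrite | github.com/shrijitb/ARKA | data/feeds/aviation_client.py | _classify_zone_aircraft
-- ===== SOURCE A (Python) =====
-- from typing import Optional
--
-- _MILITARY_CALLSIGN_MAP: dict[str, tuple[str, str]] = {
--     # US Air Force — Air Mobility Command
--     "RCH":    ("US",    "airlift"),      # Reach — heavy airlift
--     "PAT":    ("US",    "medevac"),      # Patient Air Transport
--     "EVAC":   ("US",    "evacuation"),
--     # US Special Air Mission (state transport — VP, SECDEF, POTUS surrogates)
--     "SAM":    ("US",    "vip"),
--     "VENUS":  ("US",    "vip"),          # VP aircraft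
--     "EXEC":   ("US",    "vip"),
--     # US tankers / ISR
--     "JAKE":   ("US",    "tanker"),
--     "POLO":   ("US",    "isr"),
--     "STING":  ("US",    "isr"),
--     "IRON":   ("NATO",  "exercise"),
--     # UK RAF
--     "RRR":    ("UK",    "military"),
--     "ASCOT":  ("UK",    "airlift"),
--     "COMET":  ("UK",    "isr"),
--     "VIPER":  ("UK",    "tactical"),
--     # NATO AWACSe/C2
--     "NATO":   ("NATO",  "awacs"),
--     "AWACS":  ("NATO",  "awacs"),
--     # Russia — Russian Aerospace Forces
--     "RFF":    ("Russia","military"),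
--     # Israel
--     "ELI":    ("Israel","military"),     # IAF / El Al government flights
--     "IAF":    ("Israel","military"),
--     # China — PLAAF
--     "CCA":    ("China", "military"),
--     "B20":    ("China", "military"),
--     # Generic military patterns
--     "DUKE":   ("US",    "tactical"),
--     "SWORD":  ("US",    "tactical"),
--     "HAWK":   ("US",    "tactical"),
--     "EAGLE":  ("US",    "tactical"),
--     "GHOST":  ("US",    "tactical"),
--     "MAGIC":  ("NATO",  "awacs"),
-- }
--
-- _EMERGENCY_SQUAWKS = {"7700", "7600", "7500"}
--
-- def _classify_callsign(callsign: str) -> Optional[tuple[str, str]]: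
--     """
--     Return (country, mission_type) if callsign matches a known military prefix,
--     else None.
--     """
--     cs = callsign.upper().strip()
--     for prefix, info in _MILITARY_CALLSIGN_MAP.items():
--         if cs.startswith(prefix):
--             return info
--     return None
--
-- def _classify_zone_aircraft(zone_states: list[dict]) -> dict:
--     """
--     Classify all aircraft in a zone scan into mission buckets.
--     Returns counts and callsign lists needed by the FSM.
--     """
--     military:  list[dict] = []
--     vip:       list[dict] = []
--     evac:      list[dict] = []
--     isr:       list[dict] = []
--     emergency: list[dict] = []
--
--     for ac in zone_states:
--         cs     = ac.get("callsign", "")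
--         squawk = ac.get("squawk", "")
--
--         if squawk in _EMERGENCY_SQUAWKS:
--             emergency.append(ac)
--
--         cls = _classify_callsign(cs)
--         if cls:
--             _, mission = cls
--             if mission == "vip":
--                 vip.append(ac)
--             elif mission == "evacuation":
--                 evac.append(ac)
--             elif mission == "isr":
--                 isr.append(ac)
--             elif mission in ("military", "airlift", "tanker",
--                              "tactical", "awacs", "medevac", "exercise"):
--                 military.append(ac)
--
--     return {
--         "military":  military,
--         "vip":       vip,
--         "evac":      evac,
--         "isr":       isr,
--         "emergency": emergency,
--     }
-- ===== SOURCE B (Python) =====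
-- from typing import Optional
--
-- _MILITARY_CALLSIGN_MAP: dict[str, tuple[str, str]] = {
--     "RCH":    ("US",    "airlift"),
--     "PAT":    ("US",    "medevac"),
--     "EVAC":   ("US",    "evacuation"),
--     "SAM":    ("US",    "vip"),
--     "VENUS":  ("US",    "vip"),
--     "EXEC":   ("US",    "vip"),
--     "JAKE":   ("US",    "tanker"),
--     "POLO":   ("US",    "isr"),
--     "STING":  ("US",    "isr"),
--     "IRON":   ("NATO",  "exercise"),
--     "RRR":    ("UK",    "military"),
--     "ASCOT":  ("UK",    "airlift"),
--     "COMET":  ("UK",    "isr"),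
--     "VIPER":  ("UK",    "tactical"),
--     "NATO":   ("NATO",  "awacs"),
--     "AWACS":  ("NATO",  "awacs"),
--     "RFF":    ("Russia","military"),
--     "ELI":    ("Israel","military"),
--     "IAF":    ("Israel","military"),
--     "CCA":    ("China", "military"),
--     "B20":    ("China", "military"),
--     "DUKE":   ("US",    "tactical"),
--     "SWORD":  ("US",    "tactical"),
--     "HAWK":   ("US",    "tactical"),
--     "EAGLE":  ("US",    "tactical"),
--     "GHOST":  ("US",    "tactical"),
--     "MAGIC":  ("NATO",  "awacs"),
-- }
--
-- _EMERGENCY_SQUAWKS = {"7700", "7600", "7500"}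
--
-- _MILITARY_MISSIONS = {"military", "airlift", "tanker",
--                       "tactical", "awacs", "medevac", "exercise"}
--
--
-- def _mission(callsign: str) -> Optional[str]:
--     cs = callsign.upper().strip()
--     return next((m for p, (_, m) in _MILITARY_CALLSIGN_MAP.items()
--                  if cs.startswith(p)), None)
--
--
-- def _classify_zone_aircraft(zone_states: list[dict]) -> dict:
--     # one classification pass, then five independent selections
--     ann = [(ac,
--             _mission(ac.get("callsign", "")),
--             ac.get("squawk", "") in _EMERGENCY_SQUAWKS)
--            for ac in zone_states]
--     return {
--         "military":  [ac for ac, m, _ in ann if m in _MILITARY_MISSIONS],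
--         "vip":       [ac for ac, m, _ in ann if m == "vip"],
--         "evac":      [ac for ac, m, _ in ann if m == "evacuation"],
--         "isr":       [ac for ac, m, _ in ann if m == "isr"],
--         "emergency": [ac for ac, _, e in ann if e],
--     }
-- ===== Notes on version B (the rewrite author's own statement) =====
-- stated objective: alternative
-- what changed: A's single pass with one if/elif chain appending into five accumulator lists is replaced by one annotation pass (aircraft, mission classification, emergency flag) followed by five independent filter comprehensions, one per bucket.
import Mathlib
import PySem

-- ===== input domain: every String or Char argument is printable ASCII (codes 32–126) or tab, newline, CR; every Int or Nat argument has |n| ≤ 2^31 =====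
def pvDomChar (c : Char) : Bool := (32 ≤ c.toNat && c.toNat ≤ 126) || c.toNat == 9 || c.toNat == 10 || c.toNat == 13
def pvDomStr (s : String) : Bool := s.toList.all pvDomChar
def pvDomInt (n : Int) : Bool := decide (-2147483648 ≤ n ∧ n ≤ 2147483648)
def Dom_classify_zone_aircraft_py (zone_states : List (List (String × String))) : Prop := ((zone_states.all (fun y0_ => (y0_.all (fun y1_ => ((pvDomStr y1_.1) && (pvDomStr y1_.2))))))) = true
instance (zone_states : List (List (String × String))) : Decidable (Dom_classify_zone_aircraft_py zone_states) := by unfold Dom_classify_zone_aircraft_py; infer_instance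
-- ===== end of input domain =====

-- B replaces A's single five-accumulator if/elif loop by one annotation pass (aircraft, mission, emergency flag)
-- plus five independent filter passes; objective: alternative decomposition, same cost.


-- shared constant data (the module-level dict _MILITARY_CALLSIGN_MAP as its insertion-ordered item list)
def pvMilMap : List (String × String × String) :=
  [("RCH", "US", "airlift"), ("PAT", "US", "medevac"), ("EVAC", "US", "evacuation"),
   ("SAM", "US", "vip"), ("VENUS", "US", "vip"), ("EXEC", "US", "vip"),
   ("JAKE", "US", "tanker"), ("POLO", "US", "isr"), ("STING", "US", "isr"),
   ("IRON", "NATO", "exercise"), ("RRR", "UK", "military"), ("ASCOT", "UK", "airlift"),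
   ("COMET", "UK", "isr"), ("VIPER", "UK", "tactical"), ("NATO", "NATO", "awacs"),
   ("AWACS", "NATO", "awacs"), ("RFF", "Russia", "military"), ("ELI", "Israel", "military"),
   ("IAF", "Israel", "military"), ("CCA", "China", "military"), ("B20", "China", "military"),
   ("DUKE", "US", "tactical"), ("SWORD", "US", "tactical"), ("HAWK", "US", "tactical"),
   ("EAGLE", "US", "tactical"), ("GHOST", "US", "tactical"), ("MAGIC", "NATO", "awacs")]

def pvEmergencySquawks : List String := ["7700", "7600", "7500"]

def pvMilitaryMissions : List String :=
  ["military", "airlift", "tanker", "tactical", "awacs", "medevac", "exercise"]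

-- dict.get(k, dflt) on an association list: first match
def pvGetD (d : List (String × String)) (k dflt : String) : String :=
  match d.find? (fun p => p.1 == k) with
  | some p => p.2
  | none => dflt

-- ===== PORT A =====
-- A's _classify_callsign: explicit scan of the map items, returning the first matching info
def pvCCLoop (cs : String) : List (String × String × String) → Option (String × String)
  | [] => none
  | (p, info) :: rest => if PySem.Str.startswith cs p then some info else pvCCLoop cs rest

def classify_callsign_A (callsign : String) : Option (String × String) :=
  pvCCLoop (PySem.Str.strip (PySem.Str.upper callsign)) pvMilMap

def pvAStep
    (st : List (List (String × String)) × List (List (String × String)) × List (List (String × String)) ×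
          List (List (String × String)) × List (List (String × String)))
    (ac : List (String × String)) :
    List (List (String × String)) × List (List (String × String)) × List (List (String × String)) ×
    List (List (String × String)) × List (List (String × String)) :=
  -- cs / squawk (Python's locals) are inlined at their use sites
  match st with
  | (mil, vip, evac, isr, em) =>
    let em := if pvEmergencySquawks.contains (pvGetD ac "squawk" "") then em ++ [ac] else em
    match classify_callsign_A (pvGetD ac "callsign" "") with
    | none => (mil, vip, evac, isr, em)
    | some info =>
      let mission := info.2
      if mission == "vip" then (mil, vip ++ [ac], evac, isr, em)
      else if mission == "evacuation" then (mil, vip, evac ++ [ac], isr, em)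
      else if mission == "isr" then (mil, vip, evac, isr ++ [ac], em)
      else if pvMilitaryMissions.contains mission then (mil ++ [ac], vip, evac, isr, em)
      else (mil, vip, evac, isr, em)

def classify_zone_aircraft_py (zone_states : List (List (String × String))) : List (String × List (List (String × String))) :=
  let st := zone_states.foldl pvAStep ([], [], [], [], [])
  [("military", st.1), ("vip", st.2.1), ("evac", st.2.2.1), ("isr", st.2.2.2.1), ("emergency", st.2.2.2.2)]

-- ===== PORT B =====
-- B's _mission: first map item whose prefix matches, via find?
def mission_B (callsign : String) : Option String :=
  let cs := PySem.Str.strip (PySem.Str.upper callsign)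
  (pvMilMap.find? (fun e => PySem.Str.startswith cs e.1)).map (fun e => e.2.2)

-- one annotated triple per aircraft: (ac, mission classification, emergency-squawk flag)
def annElem (ac : List (String × String)) : List (String × String) × Option String × Bool :=
  (ac, mission_B (pvGetD ac "callsign" ""), pvEmergencySquawks.contains (pvGetD ac "squawk" ""))

def pvAnnotate (zone_states : List (List (String × String))) :
    List (List (String × String) × Option String × Bool) :=
  zone_states.map annElem

-- the five selection predicates of B's comprehensions (tuple unpacking = pattern matching)
def qMil : List (String × String) × Option String × Bool → Bool
  | (_, some m, _) => pvMilitaryMissions.contains m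
  | (_, none, _) => false
def qVip : List (String × String) × Option String × Bool → Bool
  | (_, m, _) => m == some "vip"
def qEvac : List (String × String) × Option String × Bool → Bool
  | (_, m, _) => m == some "evacuation"
def qIsr : List (String × String) × Option String × Bool → Bool
  | (_, m, _) => m == some "isr"
def qEm : List (String × String) × Option String × Bool → Bool
  | (_, _, e) => e

def classify_zone_aircraft_py_alt (zone_states : List (List (String × String))) : List (String × List (List (String × String))) :=
  let ann := pvAnnotate zone_states
  [("military", ((ann.filter qMil).map (fun t => t.1))),
   ("vip", ((ann.filter qVip).map (fun t => t.1))),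
   ("evac", ((ann.filter qEvac).map (fun t => t.1))),
   ("isr", ((ann.filter qIsr).map (fun t => t.1))),
   ("emergency", ((ann.filter qEm).map (fun t => t.1)))]

-- ===== PRECONDITION & SPEC =====
def Spec_classify_zone_aircraft_py (zone_states : List (List (String × String))) (out : List (String × List (List (String × String)))) : Prop := out = classify_zone_aircraft_py_alt zone_states
instance (zone_states : List (List (String × String))) (out : List (String × List (List (String × String)))) : Decidable (Spec_classify_zone_aircraft_py zone_states out) := by unfold Spec_classify_zone_aircraft_py; infer_instance

-- ===== CLAIM (what is proved, stated in full; the proofs are below) =====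
def Claim_equal_classify_zone_aircraft_py : Prop := ∀ (zone_states : List (List (String × String))), Dom_classify_zone_aircraft_py zone_states → Spec_classify_zone_aircraft_py zone_states (classify_zone_aircraft_py zone_states)

-- ===== LEMMAS AND PROOFS =====

-- A's map scan and B's find? classification agree (B keeps only the mission component)
theorem pvCCLoop_eq_find (cs : String) (l : List (String × String × String)) :
    pvCCLoop cs l = (l.find? (fun e => PySem.Str.startswith cs e.1)).map (fun e => e.2) := by
  induction l with
  | nil => rfl
  | cons hd tl ih =>
    obtain ⟨p, info⟩ := hd
    simp only [pvCCLoop, List.find?]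
    by_cases h : PySem.Chars.startswith cs.toList p.toList
    · simp [h]
    · simp [h, ih]

theorem classifyA_mission (callsign : String) :
    (classify_callsign_A callsign).map (fun i => i.2) = mission_B callsign := by
  simp [classify_callsign_A, mission_B, pvCCLoop_eq_find, Option.map_map]
  rfl

-- per-aircraft bucket predicates: B's selection predicates composed with the annotation
def pMil (ac : List (String × String)) : Bool := qMil (annElem ac)
def pVip (ac : List (String × String)) : Bool := qVip (annElem ac)
def pEvac (ac : List (String × String)) : Bool := qEvac (annElem ac)
def pIsr (ac : List (String × String)) : Bool := qIsr (annElem ac)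
def pEm (ac : List (String × String)) : Bool := qEm (annElem ac)

theorem qMil_mk (a : List (String × String)) (m : Option String) (e : Bool) :
    qMil (a, m, e) = match m with | some s => pvMilitaryMissions.contains s | none => false := by cases m <;> rfl
theorem qVip_mk (a : List (String × String)) (m : Option String) (e : Bool) :
    qVip (a, m, e) = (m == some "vip") := rfl
theorem qEvac_mk (a : List (String × String)) (m : Option String) (e : Bool) :
    qEvac (a, m, e) = (m == some "evacuation") := rfl
theorem qIsr_mk (a : List (String × String)) (m : Option String) (e : Bool) :
    qIsr (a, m, e) = (m == some "isr") := rfl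
theorem qEm_mk (a : List (String × String)) (m : Option String) (e : Bool) :
    qEm (a, m, e) = e := rfl

-- A's loop body updates the five accumulators independently, each by an append-if
theorem pvAStep_eq (mil vip evac isr em : List (List (String × String))) (ac : List (String × String)) :
    pvAStep (mil, vip, evac, isr, em) ac =
      (if pMil ac then mil ++ [ac] else mil,
       if pVip ac then vip ++ [ac] else vip,
       if pEvac ac then evac ++ [ac] else evac,
       if pIsr ac then isr ++ [ac] else isr,
       if pEm ac then em ++ [ac] else em) := by
  have c5 : pEm ac = pvEmergencySquawks.contains (pvGetD ac "squawk" "") := by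
    unfold pEm annElem; rw [qEm_mk]
  unfold pvAStep
  rcases h : classify_callsign_A (pvGetD ac "callsign" "") with _ | ⟨country, mission⟩ <;> simp only []
  · have hm : mission_B (pvGetD ac "callsign" "") = none := by
      rw [← classifyA_mission, h]; rfl
    have c1 : pMil ac = false := by unfold pMil annElem; rw [hm, qMil_mk]
    have c2 : pVip ac = false := by unfold pVip annElem; rw [hm, qVip_mk]; decide
    have c3 : pEvac ac = false := by unfold pEvac annElem; rw [hm, qEvac_mk]; decide
    have c4 : pIsr ac = false := by unfold pIsr annElem; rw [hm, qIsr_mk]; decide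
    rw [c1, c2, c3, c4, c5]
    simp only [Bool.false_eq_true, if_false]
  · have hm : mission_B (pvGetD ac "callsign" "") = some mission := by
      rw [← classifyA_mission, h]; rfl
    have c1 : pMil ac = pvMilitaryMissions.contains mission := by
      unfold pMil annElem; rw [hm, qMil_mk]
    have c2 : pVip ac = (mission == "vip") := by
      unfold pVip annElem; rw [hm, qVip_mk]; simp
    have c3 : pEvac ac = (mission == "evacuation") := by
      unfold pEvac annElem; rw [hm, qEvac_mk]; simp
    have c4 : pIsr ac = (mission == "isr") := by
      unfold pIsr annElem; rw [hm, qIsr_mk]; simp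
    rw [c1, c2, c3, c4, c5]
    by_cases b1 : (mission == "vip") = true
    · have hb : mission = "vip" := by simpa using b1
      subst hb
      rw [if_pos b1, if_pos b1,
          if_neg (show ¬ ((("vip" : String) == "evacuation") = true) by decide),
          if_neg (show ¬ ((("vip" : String) == "isr") = true) by decide),
          if_neg (show ¬ (pvMilitaryMissions.contains "vip" = true) by decide)]
    · rw [if_neg b1, if_neg b1]
      by_cases b2 : (mission == "evacuation") = true
      · have hb : mission = "evacuation" := by simpa using b2
        subst hb
        rw [if_pos b2, if_pos b2,
            if_neg (show ¬ ((("evacuation" : String) == "isr") = true) by decide),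
            if_neg (show ¬ (pvMilitaryMissions.contains "evacuation" = true) by decide)]
      · rw [if_neg b2, if_neg b2]
        by_cases b3 : (mission == "isr") = true
        · have hb : mission = "isr" := by simpa using b3
          subst hb
          rw [if_pos b3, if_pos b3,
              if_neg (show ¬ (pvMilitaryMissions.contains "isr" = true) by decide)]
        · rw [if_neg b3, if_neg b3]
          by_cases b4 : pvMilitaryMissions.contains mission = true
          · rw [if_pos b4, if_pos b4]
          · rw [if_neg b4, if_neg b4]

-- the fold splits into five independent append-if folds
theorem pvFold_split (zs : List (List (String × String)))
    (mil vip evac isr em : List (List (String × String))) :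
    zs.foldl pvAStep (mil, vip, evac, isr, em) =
      (zs.foldl (fun acc ac => if pMil ac then acc ++ [ac] else acc) mil,
       zs.foldl (fun acc ac => if pVip ac then acc ++ [ac] else acc) vip,
       zs.foldl (fun acc ac => if pEvac ac then acc ++ [ac] else acc) evac,
       zs.foldl (fun acc ac => if pIsr ac then acc ++ [ac] else acc) isr,
       zs.foldl (fun acc ac => if pEm ac then acc ++ [ac] else acc) em) := by
  induction zs generalizing mil vip evac isr em with
  | nil => rfl
  | cons ac tl ih => rw [List.foldl_cons, pvAStep_eq]; simp only [List.foldl_cons]; exact ih _ _ _ _ _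

-- B's filtered-annotation buckets are plain filters of the input
theorem annElem_fst (ac : List (String × String)) : (annElem ac).1 = ac := rfl

theorem pvBucket_eq (zs : List (List (String × String)))
    (q : List (String × String) × Option String × Bool → Bool)
    (p : List (String × String) → Bool)
    (h : ∀ ac, q (annElem ac) = p ac) :
    ((pvAnnotate zs).filter q).map (fun t => t.1) = zs.filter p := by
  induction zs with
  | nil => rfl
  | cons ac tl ih =>
    simp only [pvAnnotate] at ih ⊢
    simp only [List.map_cons, List.filter_cons]
    rw [h ac]
    by_cases hp : p ac = true
    · rw [if_pos hp, if_pos hp, List.map_cons, ih, annElem_fst]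
    · rw [if_neg hp, if_neg hp, ih]

-- ===== VERDICT (by name: the statement is the Claim_ definition above) =====
theorem classify_zone_aircraft_py_spec : Claim_equal_classify_zone_aircraft_py := by
  intro zs _
  unfold Spec_classify_zone_aircraft_py classify_zone_aircraft_py classify_zone_aircraft_py_alt
  simp only []
  rw [pvFold_split]
  simp only []
  rw [PySem.List.foldl_append_if_eq_filter, PySem.List.foldl_append_if_eq_filter,
      PySem.List.foldl_append_if_eq_filter, PySem.List.foldl_append_if_eq_filter,
      PySem.List.foldl_append_if_eq_filter]
  simp only [List.nil_append]
  rw [pvBucket_eq zs qMil pMil (fun ac => by unfold pMil; rfl),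
      pvBucket_eq zs qVip pVip (fun ac => by unfold pVip; rfl),
      pvBucket_eq zs qEvac pEvac (fun ac => by unfold pEvac; rfl),
      pvBucket_eq zs qIsr pIsr (fun ac => by unfold pIsr; rfl),
      pvBucket_eq zs qEm pEm (fun ac => by unfold pEm; rfl)]
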